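-- pv_equiv track=rewrite | github.com/kingdy2002/muzero-general | replay_buffer.py | get_batch_for_pc_value_batch
-- ===== SOURCE A (Python) =====
-- def get_batch_for_pc_value_batch(action_batchs, length) :
--     for index in range(length) :
--         action_batch,observation_indexs = [],[]
--         for i, actions in enumerate(action_batchs) :
--             if len(actions) > index :
--                 observation_indexs.append(i)
--                 action_batch.append(actions[index])
--             else :
--                 action_batch.append(0)
--         yield action_batch ,observation_indexs
-- ===== SOURCE B (Python) =====
-- def get_batch_for_pc_value_batch(action_batchs, length):
--     # Single scatter pass: build the per-timestep columns in one sweep over the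
--     # sequences, then yield them; A instead rescans all sequences once per timestep.
--     rows = list(action_batchs)
--     action_cols = [[] for _ in range(length)]
--     obs_cols = [[] for _ in range(length)]
--     for i, actions in enumerate(rows):
--         for j, a in enumerate(actions[:len(action_cols)]):
--             action_cols[j].append(a)
--             obs_cols[j].append(i)
--         for j in range(len(actions), length):
--             action_cols[j].append(0)
--     for col in zip(action_cols, obs_cols):
--         yield col
-- ===== Notes on version B (the rewrite author's own statement) =====
-- stated objective: alternative
-- what changed: Instead of rescanning all sequences once per timestep (outer loop over timesteps, inner loop over sequences), B makes a single pass over the sequences that scatters each action into per-timestep column lists built up front, then yields the finished columns.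
import Mathlib
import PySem

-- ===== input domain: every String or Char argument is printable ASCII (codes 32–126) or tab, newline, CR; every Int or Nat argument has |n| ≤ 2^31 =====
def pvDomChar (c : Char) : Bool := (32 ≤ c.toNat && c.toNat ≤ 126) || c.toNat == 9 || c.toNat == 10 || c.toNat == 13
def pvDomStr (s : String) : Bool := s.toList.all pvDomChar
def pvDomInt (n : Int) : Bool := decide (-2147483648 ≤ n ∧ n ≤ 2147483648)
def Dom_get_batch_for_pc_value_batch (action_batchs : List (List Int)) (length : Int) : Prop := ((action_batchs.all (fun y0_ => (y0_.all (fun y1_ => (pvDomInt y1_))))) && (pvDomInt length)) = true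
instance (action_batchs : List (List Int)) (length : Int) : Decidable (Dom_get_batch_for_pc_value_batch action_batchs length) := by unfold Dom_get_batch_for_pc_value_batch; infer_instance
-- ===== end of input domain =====

-- B replaces A's per-timestep rescans of all sequences by one scatter pass that
-- builds all per-timestep columns at once (objective: alternative decomposition).
-- Both Pythons are generators; equivalence is about the list of yielded values.

-- ===== PORT A =====
-- body of A's inner 'for i, actions in enumerate(action_batchs)' loop
def pvColStep (index : Int) (st : List Int × List Int) (p : Int × List Int) : List Int × List Int :=
  if (p.2.length : Int) > index then
    (st.1 ++ [PySem.List.pyGetD p.2 index 0], st.2 ++ [p.1])   -- actions[index] is in range here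
  else
    (st.1 ++ [0], st.2)

def get_batch_for_pc_value_batch (action_batchs : List (List Int)) (length : Int) : List (List Int × List Int) :=
  (PySem.List.pyRange 0 length 1).map (fun index =>
    (PySem.List.enumerate action_batchs 0).foldl (pvColStep index) ([], []))

-- ===== PORT B =====
-- body of B's outer 'for i, actions in enumerate(rows)' loop: scatter one row into the columns
def pvRowStep (length : Int) (st : List (List Int) × List (List Int)) (p : Int × List Int) :
    List (List Int) × List (List Int) :=
  let st1 := (PySem.List.enumerate (PySem.List.slice p.2 none (some (st.1.length : Int))) 0).foldl
    (fun (st : List (List Int) × List (List Int)) q =>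
      (st.1.modify q.1.toNat (· ++ [q.2]), st.2.modify q.1.toNat (· ++ [p.1]))) st
  (PySem.List.pyRange (p.2.length : Int) length 1).foldl
    (fun (st : List (List Int) × List (List Int)) j => (st.1.modify j.toNat (· ++ [0]), st.2)) st1

def get_batch_for_pc_value_batch_alt (action_batchs : List (List Int)) (length : Int) :
    List (List Int × List Int) :=
  let acols0 : List (List Int) := (PySem.List.pyRange 0 length 1).map (fun _ => [])
  let ocols0 : List (List Int) := (PySem.List.pyRange 0 length 1).map (fun _ => [])
  let fin := (PySem.List.enumerate action_batchs 0).foldl (pvRowStep length) (acols0, ocols0)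
  fin.1.zip fin.2

-- ===== PRECONDITION & SPEC =====
def Spec_get_batch_for_pc_value_batch (action_batchs : List (List Int)) (length : Int) (out : List (List Int × List Int)) : Prop := out = get_batch_for_pc_value_batch_alt action_batchs length
instance (action_batchs : List (List Int)) (length : Int) (out : List (List Int × List Int)) : Decidable (Spec_get_batch_for_pc_value_batch action_batchs length out) := by unfold Spec_get_batch_for_pc_value_batch; infer_instance

-- ===== CLAIM (what is proved, stated in full; the proofs are below) =====
def Claim_equal_get_batch_for_pc_value_batch : Prop := ∀ (action_batchs : List (List Int)) (length : Int), Dom_get_batch_for_pc_value_batch action_batchs length → Spec_get_batch_for_pc_value_batch action_batchs length (get_batch_for_pc_value_batch action_batchs length)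

-- ===== LEMMAS AND PROOFS =====

-- effect of B's first inner loop on one column
lemma pv_scatter_get :
    ∀ (xs : List Int) (s : Nat) (i : Int) (cs os : List (List Int)),
      ∀ j : Nat,
        ((PySem.List.enumerate xs (s : Int)).foldl
          (fun (st : List (List Int) × List (List Int)) q =>
            (st.1.modify q.1.toNat (· ++ [q.2]), st.2.modify q.1.toNat (· ++ [i]))) (cs, os)).1[j]? = (if s ≤ j ∧ j < s + xs.length then (cs[j]?.map (· ++ [xs[j - s]?.getD 0])) else cs[j]?) ∧
        ((PySem.List.enumerate xs (s : Int)).foldl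
          (fun (st : List (List Int) × List (List Int)) q =>
            (st.1.modify q.1.toNat (· ++ [q.2]), st.2.modify q.1.toNat (· ++ [i]))) (cs, os)).2[j]? = (if s ≤ j ∧ j < s + xs.length then (os[j]?.map (· ++ [i])) else os[j]?) := by
  intro xs
  induction xs with
  | nil =>
    intro s i cs os j
    simp only [PySem.List.enumerate_nil, List.foldl_nil, List.length_nil, Nat.add_zero]
    refine ⟨?_, ?_⟩ <;> rw [if_neg (by omega)]
  | cons x xs ih =>
    intro s i cs os j
    simp only [PySem.List.enumerate_cons, List.foldl_cons]
    have hcast : (s : Int) + 1 = ((s + 1 : Nat) : Int) := by push_cast; ring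
    rw [hcast]
    have H := ih (s + 1) i (cs.modify ((s : Int)).toNat (· ++ [x])) (os.modify ((s : Int)).toNat (· ++ [i])) j
    simp only [Int.toNat_natCast] at H ⊢
    rcases H with ⟨H1, H2⟩
    constructor
    · rw [H1, List.getElem?_modify]
      by_cases hj : j = s
      · subst hj
        rw [if_neg (by omega), if_pos (by simp only [List.length_cons]; omega)]
        cases cs[j]? <;> simp
      · by_cases hj2 : s + 1 ≤ j ∧ j < s + 1 + xs.length
        · rw [if_pos hj2, if_pos (by simp only [List.length_cons]; omega)]
          have hs : j - s = (j - (s + 1)) + 1 := by omega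
          rw [hs]
          cases cs[j]? <;> simp [Ne.symm hj]
        · rw [if_neg hj2, if_neg (by simp only [List.length_cons]; omega)]
          cases cs[j]? <;> simp [Ne.symm hj]
    · rw [H2, List.getElem?_modify]
      by_cases hj : j = s
      · subst hj
        rw [if_neg (by omega), if_pos (by simp only [List.length_cons]; omega)]
        cases os[j]? <;> simp
      · by_cases hj2 : s + 1 ≤ j ∧ j < s + 1 + xs.length
        · rw [if_pos hj2, if_pos (by simp only [List.length_cons]; omega)]
          cases os[j]? <;> simp [Ne.symm hj]
        · rw [if_neg hj2, if_neg (by simp only [List.length_cons]; omega)]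
          cases os[j]? <;> simp [Ne.symm hj]

-- effect of B's second inner loop on one column
lemma pv_pad_get :
    ∀ (m a : Nat) (st : List (List Int) × List (List Int)),
      ∀ j : Nat,
        (((List.range m).map (fun (k : Nat) => ((a : Int) + (k : Int)))).foldl
          (fun (st : List (List Int) × List (List Int)) j => (st.1.modify j.toNat (· ++ [0]), st.2)) st).1[j]? = (if a ≤ j ∧ j < a + m then (st.1[j]?.map (· ++ [0])) else st.1[j]?) ∧
        (((List.range m).map (fun (k : Nat) => ((a : Int) + (k : Int)))).foldl
          (fun (st : List (List Int) × List (List Int)) j => (st.1.modify j.toNat (· ++ [0]), st.2)) st).2 = st.2 := by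
  intro m
  induction m with
  | zero =>
    intro a st j
    simp only [List.range_zero, List.map_nil, List.foldl_nil, Nat.add_zero]
    exact ⟨by rw [if_neg (by omega)], by trivial⟩
  | succ m ih =>
    intro a st j
    rw [List.range_succ, List.map_append, List.foldl_append]
    simp only [List.map_cons, List.map_nil, List.foldl_cons, List.foldl_nil]
    have htn : ((a : Int) + (m : Nat)).toNat = a + m := by omega
    constructor
    · rw [List.getElem?_modify, htn, (ih a st j).1]
      by_cases hj : j = a + m
      · subst hj
        rw [if_neg (by omega), if_pos (by omega)]
        cases st.1[a + m]? <;> simp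
      · by_cases hj2 : a ≤ j ∧ j < a + m
        · rw [if_pos hj2, if_pos (by omega)]
          cases st.1[j]? <;> simp [Ne.symm hj]
        · rw [if_neg hj2, if_neg (by omega)]
          cases st.1[j]? <;> simp [Ne.symm hj]
    · exact (ih a st j).2

-- one row of B acts on column j exactly like A's pvColStep
lemma pv_row_get (length : Int) (p : Int × List Int) (cs os : List (List Int))
    (hc : cs.length = length.toNat) (j : Nat) (hj : (j : Int) < length) :
    (pvRowStep length (cs, os) p).1[j]? = (cs[j]?.map (fun u => (pvColStep (j : Int) (u, os[j]?.getD []) p).1)) ∧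
    (pvRowStep length (cs, os) p).2[j]? = (os[j]?.map (fun u => (pvColStep (j : Int) (cs[j]?.getD [], u) p).2)) := by
  have hj0 : j < length.toNat := by omega
  unfold pvRowStep
  simp only [hc, PySem.List.slice_to_natCast, PySem.List.pyRange_one]
  have H := pv_scatter_get (p.2.take length.toNat) 0 p.1 cs os j
  simp only [Nat.cast_zero, Nat.zero_add, Nat.sub_zero, Nat.zero_le, true_and, List.length_take] at H
  have HP := pv_pad_get ((length - (p.2.length : Int)).toNat) p.2.length
    ((PySem.List.enumerate (p.2.take length.toNat) 0).foldl
      (fun (st : List (List Int) × List (List Int)) q =>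
        (st.1.modify q.1.toNat (· ++ [q.2]), st.2.modify q.1.toNat (· ++ [p.1]))) (cs, os)) j
  rw [HP.1, HP.2, H.1, H.2]
  by_cases hcase : j < p.2.length
  · rw [if_neg (by omega), if_pos (by omega), if_pos (by omega)]
    rw [List.getElem?_take, if_pos hj0, List.getElem?_eq_getElem hcase]
    have hgt : ((p.2.length : Int)) > (j : Int) := by exact_mod_cast hcase
    have hg : PySem.List.pyGetD p.2 (j : Int) 0 = p.2[j]'hcase := by
      rw [PySem.List.pyGetD_eq_getElem p.2 0 (by omega) (by exact_mod_cast hcase)]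
      simp
    simp only [pvColStep, if_pos hgt, hg]
    constructor
    · cases cs[j]? <;> simp
    · cases os[j]? <;> simp
  · rw [if_pos (by omega), if_neg (by omega), if_neg (by omega)]
    have hng : ¬ ((p.2.length : Int) > (j : Int)) := by omega
    simp only [pvColStep, if_neg hng]
    constructor
    · cases cs[j]? <;> simp
    · cases os[j]? <;> simp

-- fold of modifies preserves lengths
lemma pv_scatter_len :
    ∀ (l : List (Int × Int)) (i : Int) (st : List (List Int) × List (List Int)),
      (l.foldl (fun (st : List (List Int) × List (List Int)) q =>
        (st.1.modify q.1.toNat (· ++ [q.2]), st.2.modify q.1.toNat (· ++ [i]))) st).1.length = st.1.length ∧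
      (l.foldl (fun (st : List (List Int) × List (List Int)) q =>
        (st.1.modify q.1.toNat (· ++ [q.2]), st.2.modify q.1.toNat (· ++ [i]))) st).2.length = st.2.length := by
  intro l
  induction l with
  | nil => intro i st; exact ⟨rfl, rfl⟩
  | cons q l ih =>
    intro i st
    simp only [List.foldl_cons]
    have H := ih i (st.1.modify q.1.toNat (· ++ [q.2]), st.2.modify q.1.toNat (· ++ [i]))
    simpa [List.length_modify] using H

lemma pv_pad_len :
    ∀ (l : List Int) (st : List (List Int) × List (List Int)),
      (l.foldl (fun (st : List (List Int) × List (List Int)) j => (st.1.modify j.toNat (· ++ [0]), st.2)) st).1.length = st.1.length ∧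
      (l.foldl (fun (st : List (List Int) × List (List Int)) j => (st.1.modify j.toNat (· ++ [0]), st.2)) st).2.length = st.2.length := by
  intro l
  induction l with
  | nil => intro st; exact ⟨rfl, rfl⟩
  | cons q l ih =>
    intro st
    simp only [List.foldl_cons]
    have H := ih (st.1.modify q.toNat (· ++ [0]), st.2)
    simpa [List.length_modify] using H

lemma pv_row_len (length : Int) (p : Int × List Int) (st : List (List Int) × List (List Int)) :
    (pvRowStep length st p).1.length = st.1.length ∧ (pvRowStep length st p).2.length = st.2.length := by
  unfold pvRowStep
  have H1 := pv_scatter_len (PySem.List.enumerate (PySem.List.slice p.2 none (some (st.1.length : Int))) 0) p.1 st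
  have H2 := pv_pad_len (PySem.List.pyRange (p.2.length : Int) length 1)
    ((PySem.List.enumerate (PySem.List.slice p.2 none (some (st.1.length : Int))) 0).foldl
      (fun (st : List (List Int) × List (List Int)) q =>
        (st.1.modify q.1.toNat (· ++ [q.2]), st.2.modify q.1.toNat (· ++ [p.1]))) st)
  exact ⟨H2.1.trans H1.1, H2.2.trans H1.2⟩

-- the invariant: folding B's row steps computes A's column folds pointwise
lemma pv_main (length : Int) :
    ∀ (es : List (Int × List Int)) (cs os : List (List Int)),
      cs.length = length.toNat → os.length = length.toNat →
      (es.foldl (pvRowStep length) (cs, os)).1.length = length.toNat ∧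
      (es.foldl (pvRowStep length) (cs, os)).2.length = length.toNat ∧
      ∀ j : Nat, (j : Int) < length →
        (es.foldl (pvRowStep length) (cs, os)).1[j]? =
          some (es.foldl (pvColStep (j : Int)) (cs[j]?.getD [], os[j]?.getD [])).1 ∧
        (es.foldl (pvRowStep length) (cs, os)).2[j]? =
          some (es.foldl (pvColStep (j : Int)) (cs[j]?.getD [], os[j]?.getD [])).2 := by
  intro es
  induction es with
  | nil =>
    intro cs os hcs hos
    refine ⟨hcs, hos, ?_⟩
    intro j hj
    have hj0 : j < cs.length := by omega
    have hj1 : j < os.length := by omega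
    simp only [List.foldl_nil]
    rw [List.getElem?_eq_getElem hj0, List.getElem?_eq_getElem hj1]
    simp
  | cons e es ih =>
    intro cs os hcs hos
    simp only [List.foldl_cons]
    have hR := pv_row_len length e (cs, os)
    have hl1 : (pvRowStep length (cs, os) e).1.length = length.toNat := by rw [hR.1]; exact hcs
    have hl2 : (pvRowStep length (cs, os) e).2.length = length.toNat := by rw [hR.2]; exact hos
    have IH := ih (pvRowStep length (cs, os) e).1 (pvRowStep length (cs, os) e).2 hl1 hl2
    simp only [Prod.mk.eta] at IH
    refine ⟨IH.1, IH.2.1, ?_⟩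
    intro j hj
    have hg := pv_row_get length e cs os hcs j hj
    have hj0 : j < cs.length := by omega
    have hj1 : j < os.length := by omega
    have hcj : cs[j]? = some (cs[j]'hj0) := List.getElem?_eq_getElem hj0
    have hoj : os[j]? = some (os[j]'hj1) := List.getElem?_eq_getElem hj1
    have hpair : ((pvRowStep length (cs, os) e).1[j]?.getD [], (pvRowStep length (cs, os) e).2[j]?.getD [])
        = pvColStep (j : Int) (cs[j]?.getD [], os[j]?.getD []) e := by
      rw [hg.1, hg.2, hcj, hoj]
      simp
    constructor
    · rw [(IH.2.2 j hj).1, hpair]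
    · rw [(IH.2.2 j hj).2, hpair]

-- ===== VERDICT (by name: the statement is the Claim_ definition above) =====
theorem get_batch_for_pc_value_batch_spec : Claim_equal_get_batch_for_pc_value_batch := by
  intro ab length _hd
  unfold Spec_get_batch_for_pc_value_batch
  unfold get_batch_for_pc_value_batch get_batch_for_pc_value_batch_alt
  have hc0 : ((PySem.List.pyRange 0 length 1).map (fun _ => ([] : List Int))).length = length.toNat := by
    simp [PySem.List.length_pyRange_one]
  have HM := pv_main length (PySem.List.enumerate ab 0)
    ((PySem.List.pyRange 0 length 1).map (fun _ => ([] : List Int)))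
    ((PySem.List.pyRange 0 length 1).map (fun _ => ([] : List Int))) hc0 hc0
  apply List.ext_getElem
  · simp only [List.length_map, List.length_zip, HM.1, HM.2.1, PySem.List.length_pyRange_one,
      Nat.min_self, Int.sub_zero]
  · intro j hjA hjB
    have hjN : j < length.toNat := by
      simpa [PySem.List.length_pyRange_one] using hjA
    have hjI : (j : Int) < length := by omega
    have H := HM.2.2 j hjI
    simp only [List.getElem?_map, PySem.List.getElem?_pyRange_one, Int.sub_zero, if_pos hjN,
      Option.map_some, Option.getD_some, Int.zero_add] at H
    rw [List.getElem_map, List.getElem_zip, PySem.List.getElem_pyRange_one]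
    have hb1 : j < ((PySem.List.enumerate ab 0).foldl (pvRowStep length)
        ((PySem.List.pyRange 0 length 1).map (fun _ => ([] : List Int)),
         (PySem.List.pyRange 0 length 1).map (fun _ => ([] : List Int)))).1.length := by
      rw [HM.1]; exact hjN
    have hb2 : j < ((PySem.List.enumerate ab 0).foldl (pvRowStep length)
        ((PySem.List.pyRange 0 length 1).map (fun _ => ([] : List Int)),
         (PySem.List.pyRange 0 length 1).map (fun _ => ([] : List Int)))).2.length := by
      rw [HM.2.1]; exact hjN
    rw [List.getElem?_eq_getElem hb1, List.getElem?_eq_getElem hb2] at H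
    simp only [Option.some.injEq] at H
    rw [Prod.ext_iff]
    refine ⟨?_, ?_⟩
    · simp only [Int.zero_add]
      rw [← H.1]
    · simp only [Int.zero_add]
      rw [← H.2]
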